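-- pv_equiv track=rewrite | github.com/miliar/Code_Jam_Webscraper | solutions_python/Problem_201/2036.py | compute_L
-- ===== SOURCE A (Python) =====
-- def compute_L(stalls):
--     L = []
--     dist = 0
--     for stall in stalls:
--         if stall == 1:
--             dist = -1
--         L.append(dist)
--         dist += 1
--     return L
-- ===== SOURCE B (Python) =====
-- def compute_L(stalls):
--     # Pass 1: index of the most recent marker (stall == 1) at or before each position, -1 if none.
--     last = []
--     last_idx = -1
--     for i, s in enumerate(stalls):
--         if s == 1:
--             last_idx = i
--         last.append(last_idx)
--     # Pass 2: distance since that marker, by index arithmetic.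
--     return [i - last[i] - 1 for i in range(len(stalls))]
-- ===== Notes on version B (the rewrite author's own statement) =====
-- stated objective: alternative
-- what changed: Replaces the single mutating reset-counter loop by a two-pass decomposition: a prefix scan recording the index of the most recent marker, then a comprehension computing each distance by index arithmetic i - last[i] - 1.
import Mathlib
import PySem

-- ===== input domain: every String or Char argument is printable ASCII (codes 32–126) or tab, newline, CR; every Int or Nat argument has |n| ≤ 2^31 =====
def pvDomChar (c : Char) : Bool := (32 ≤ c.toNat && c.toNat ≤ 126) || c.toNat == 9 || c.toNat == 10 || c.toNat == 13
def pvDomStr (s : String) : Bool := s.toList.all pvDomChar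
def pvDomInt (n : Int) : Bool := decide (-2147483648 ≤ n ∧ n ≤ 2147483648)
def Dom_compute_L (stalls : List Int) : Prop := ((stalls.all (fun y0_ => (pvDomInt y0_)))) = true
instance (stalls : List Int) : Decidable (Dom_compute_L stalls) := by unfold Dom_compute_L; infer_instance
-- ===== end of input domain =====

-- ===== PORT A =====
-- B changes the decomposition (prefix marker-index scan + index arithmetic) vs A's running reset counter; same cost.
def compute_L (stalls : List Int) : List Int :=
  (stalls.foldl (fun (st : List Int × Int) stall =>
      let d : Int := if stall = 1 then -1 else st.2
      (st.1 ++ [d], d + 1)) ([], 0)).1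

-- ===== PORT B =====
-- prefix scan: lastScan l i cur = for each position (starting at global index i), index of most recent marker (cur before)
def lastScan : List Int → Int → Int → List Int
  | [], _, _ => []
  | s :: rest, i, cur =>
      let c : Int := if s = 1 then i else cur
      c :: lastScan rest (i + 1) c

def compute_L_alt (stalls : List Int) : List Int :=
  let last := lastScan stalls 0 (-1)
  (List.range stalls.length).map (fun (j : Nat) => (j : Int) - last.getD j 0 - 1)

-- ===== PRECONDITION & SPEC =====
def Spec_compute_L (stalls : List Int) (out : List Int) : Prop := out = compute_L_alt stalls
instance (stalls : List Int) (out : List Int) : Decidable (Spec_compute_L stalls out) := by unfold Spec_compute_L; infer_instance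

-- ===== CLAIM (what is proved, stated in full; the proofs are below) =====
def Claim_equal_compute_L : Prop := ∀ (stalls : List Int), Dom_compute_L stalls → Spec_compute_L stalls (compute_L stalls)

-- ===== LEMMAS AND PROOFS =====
-- common reference function: output list given current dist
def distRef : List Int → Int → List Int
  | [], _ => []
  | s :: rest, d =>
      let d' : Int := if s = 1 then -1 else d
      d' :: distRef rest (d' + 1)

theorem foldA_eq (l : List Int) : ∀ (acc : List Int) (d : Int),
    (l.foldl (fun (st : List Int × Int) stall =>
      let dd : Int := if stall = 1 then -1 else st.2
      (st.1 ++ [dd], dd + 1)) (acc, d)).1 = acc ++ distRef l d := by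
  induction l with
  | nil => intro acc d; simp [distRef]
  | cons s rest ih =>
      intro acc d
      simp only [List.foldl, distRef]
      rw [ih]
      simp

theorem lastScan_map (l : List Int) : ∀ (i cur : Int),
    (List.range l.length).map (fun (j : Nat) => i + (j : Int) - (lastScan l i cur).getD j 0 - 1)
      = distRef l (i - cur - 1) := by
  induction l with
  | nil => intro i cur; simp [lastScan, distRef]
  | cons s rest ih =>
      intro i cur
      simp only [List.length_cons, List.range_succ_eq_map, List.map_cons, List.map_map]
      simp only [lastScan, distRef]
      refine List.cons_eq_cons.mpr ⟨?_, ?_⟩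
      · by_cases hs : s = 1 <;> simp [hs]
      · have hc : ((fun (j : Nat) => i + (j : Int)
              - ((if s = 1 then i else cur) :: lastScan rest (i + 1) (if s = 1 then i else cur)).getD j 0 - 1) ∘ Nat.succ)
            = (fun (j : Nat) => (i + 1) + (j : Int) - (lastScan rest (i + 1) (if s = 1 then i else cur)).getD j 0 - 1) := by
          funext j
          simp [Function.comp]
          ring
        rw [hc, ih (i + 1) (if s = 1 then i else cur)]
        by_cases hs : s = 1 <;> simp [hs] <;> ring_nf

-- ===== VERDICT (by name: the statement is the Claim_ definition above) =====
theorem compute_L_spec : Claim_equal_compute_L := by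
  intro stalls _
  unfold Spec_compute_L compute_L compute_L_alt
  rw [foldA_eq]
  have h := lastScan_map stalls 0 (-1)
  simp only [List.nil_append]
  rw [show (0 : Int) - (-1) - 1 = 0 from by ring] at h
  rw [← h]
  apply List.map_congr_left
  intro j _
  ring
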